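-- pv_equiv track=rewrite | github.com/Satyaki-Roy/python | Practice/prac37.py | printStar
-- ===== SOURCE A (Python) =====
-- def printStar(s, ci=-100):
--     if ci == -100:
--         ci = len(s) - 1
--
--     if ci <= 0:
--         return s[0] == 'a'
--
--     if s[ci] == 'a':
--         return printStar(s, ci - 1)
--     elif s[ci] == 'b':
--         if s[ci - 1] == 'b':
--             return printStar(s, ci - 2)
--         else:
--             return False
--     else:
--         return False
-- ===== SOURCE B (Python) =====
-- def printStar(s, ci=-100):
--     if ci == -100:
--         ci = len(s) - 1
--     while ci > 0:
--         c = s[ci]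
--         if c == 'a':
--             ci -= 1
--         elif c == 'b':
--             if s[ci - 1] == 'b':
--                 ci -= 2
--             else:
--                 return False
--         else:
--             return False
--     return s[0] == 'a'
-- ===== Notes on version B (the rewrite author's own statement) =====
-- stated objective: simpler
-- what changed: Replaced the self-recursive scan (which re-checks the -100 sentinel on every call) with a single sentinel check followed by an explicit while-loop over an index.
import Mathlib
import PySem

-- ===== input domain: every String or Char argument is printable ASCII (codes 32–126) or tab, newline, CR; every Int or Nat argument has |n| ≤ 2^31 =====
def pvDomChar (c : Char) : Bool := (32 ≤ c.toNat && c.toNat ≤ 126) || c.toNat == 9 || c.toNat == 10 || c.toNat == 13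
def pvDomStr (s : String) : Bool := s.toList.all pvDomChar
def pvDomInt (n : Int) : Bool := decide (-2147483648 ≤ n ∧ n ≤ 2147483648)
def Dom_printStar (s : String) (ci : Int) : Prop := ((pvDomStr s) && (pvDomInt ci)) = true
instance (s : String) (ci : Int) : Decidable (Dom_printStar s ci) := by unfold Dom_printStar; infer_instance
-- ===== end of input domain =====

-- B replaces A's self-recursion (which re-tests the -100 sentinel on every call) with one sentinel check and an explicit index loop; objective: simpler.


-- ===== PORT A =====
-- recursive body of A; the sentinel test is re-run on every call, exactly as in the Python.
-- s[i] is PySem.List.pyGet? (none = IndexError, excluded by Pre_; the port returns false there).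
def printStarGo (l : List Char) (ci : Int) : Bool :=
  let ci' := if ci = -100 then (l.length : Int) - 1 else ci
  if _h0 : ci' ≤ 0 then (PySem.List.pyGet? l 0 == some 'a')
  else if PySem.List.pyGet? l ci' == some 'a' then printStarGo l (ci' - 1)
  else if PySem.List.pyGet? l ci' == some 'b' then
    (if PySem.List.pyGet? l (ci' - 1) == some 'b' then printStarGo l (ci' - 2) else false)
  else false
termination_by (if ci = -100 then l.length + 1 else ci.toNat + 1)
decreasing_by
  all_goals (simp only [ci'] at *; split_ifs with h <;> split_ifs at _h0 <;> omega)

def printStar (s : String) (ci : Int) : Bool := printStarGo s.toList ci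

-- ===== PORT B =====
-- the while-loop of B, as structural recursion on the (natural) loop counter
def printStarAltLoop (l : List Char) (i : Nat) : Bool :=
  if i = 0 then (PySem.List.pyGet? l 0 == some 'a')
  else
    let c := PySem.List.pyGet? l (i : Int)
    if c == some 'a' then printStarAltLoop l (i - 1)
    else if c == some 'b' then
      (if PySem.List.pyGet? l ((i : Int) - 1) == some 'b' then printStarAltLoop l (i - 2) else false)
    else false

def printStar_alt (s : String) (ci : Int) : Bool :=
  let ci' := if ci = -100 then (s.toList.length : Int) - 1 else ci
  printStarAltLoop s.toList ci'.toNat   -- ci' ≤ 0 means the loop body never runs, as in the Python while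

-- ===== PRECONDITION & SPEC =====
-- Pre_ excludes exactly the inputs on which A raises IndexError: the empty string
-- (s[0] at the base case) and an explicit ci beyond the last index (s[ci]).
def Pre_printStar (s : String) (ci : Int) : Prop :=
  s.toList ≠ [] ∧ (ci = -100 ∨ ci < (s.toList.length : Int))
instance (s : String) (ci : Int) : Decidable (Pre_printStar s ci) := by unfold Pre_printStar; infer_instance
def pvWitness_printStar : String × Int := ("abba", -100)
def Spec_printStar (s : String) (ci : Int) (out : Bool) : Prop := out = printStar_alt s ci
instance (s : String) (ci : Int) (out : Bool) : Decidable (Spec_printStar s ci out) := by unfold Spec_printStar; infer_instance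

-- ===== CLAIM (what is proved, stated in full; the proofs are below) =====
def Claim_equal_printStar : Prop := ∀ (s : String) (ci : Int), Dom_printStar s ci → Pre_printStar s ci → Spec_printStar s ci (printStar s ci)

-- ===== LEMMAS AND PROOFS =====

-- core: A's recursion agrees with B's loop at every non-sentinel in-range index
theorem go_eq_loop (n : Nat) : ∀ (l : List Char) (ci : Int), ci.toNat ≤ n → ci ≠ -100 →
    ci < (l.length : Int) → printStarGo l ci = printStarAltLoop l ci.toNat := by
  induction n with
  | zero =>
    intro l ci hn hs hlt
    have h0 : ci ≤ 0 := by omega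
    rw [printStarGo, printStarAltLoop]
    simp only [if_neg hs]
    rw [dif_pos h0, if_pos (by omega : ci.toNat = 0)]
  | succ n ih =>
    intro l ci hn hs hlt
    by_cases h0 : ci ≤ 0
    · rw [printStarGo, printStarAltLoop]
      simp only [if_neg hs]
      rw [dif_pos h0, if_pos (by omega : ci.toNat = 0)]
    · rw [printStarGo, printStarAltLoop]
      simp only [if_neg hs]
      rw [dif_neg h0, if_neg (by omega : ¬ ci.toNat = 0)]
      have hcast : ((ci.toNat : Nat) : Int) = ci := by omega
      rw [hcast]
      have ih1 : printStarGo l (ci - 1) = printStarAltLoop l (ci.toNat - 1) := by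
        rw [ih l (ci - 1) (by omega) (by omega) (by omega)]
        congr 1; omega
      have ih2 : printStarGo l (ci - 2) = printStarAltLoop l (ci.toNat - 2) := by
        rw [ih l (ci - 2) (by omega) (by omega) (by omega)]
        congr 1; omega
      split_ifs <;> simp [ih1, ih2]

-- ===== VERDICT (by name: the statement is the Claim_ definition above) =====
theorem printStar_spec : Claim_equal_printStar := by
  intro s ci _hdom hpre
  obtain ⟨hne, hci⟩ := hpre
  have hlen : 0 < s.toList.length := List.length_pos_iff.mpr hne
  unfold Spec_printStar printStar printStar_alt
  by_cases hs : ci = -100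
  · simp only [if_pos hs]
    have hns : (s.toList.length : Int) - 1 ≠ -100 := by omega
    -- A's first call already has the sentinel replaced; relate it to one non-sentinel printStarGo call
    have key : printStarGo s.toList ((s.toList.length : Int) - 1)
        = printStarAltLoop s.toList ((s.toList.length : Int) - 1).toNat :=
      go_eq_loop ((s.toList.length : Int) - 1).toNat s.toList _ le_rfl hns (by omega)
    have unfoldA : printStarGo s.toList ci = printStarGo s.toList ((s.toList.length : Int) - 1) := by
      conv_lhs => rw [printStarGo]
      conv_rhs => rw [printStarGo]
      simp only [hs, if_neg hns, if_true]
    rw [unfoldA, key]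
  · simp only [if_neg hs]
    rcases hci with h | h
    · exact absurd h hs
    · exact go_eq_loop ci.toNat s.toList ci le_rfl hs h
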